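-- pv_equiv track=rewrite | github.com/jorgeramirezcarrasco/platintel | scraper/utils.py | get_hashtags_operations
-- ===== SOURCE A (Python) =====
-- def get_hashtags_operations(x):
--     """Function to obtain hashtags from a tweet
--
--     Arguments:
--         x {str} -- input tweet
--
--     Returns:
--         [list] -- list of hashtags extracted
--     """
--     tokens = x.split(" ")
--     # convert to lower case
--     tokens = [w.lower() for w in tokens]
--     # remove break lines
--     tokens = [w.replace('\n', '') for w in tokens]
--     # get hashtags
--     hashtags = [token for token in tokens if '#' in token]
--     # clean multiple hashtags in same line
--     hashtags = ['#'+hashtag.split('#')[1] for hashtag in hashtags]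
--     # get operation hashtags
--     hashtags = [hashtag for hashtag in hashtags if '#op' == hashtag[:3]]
--     return hashtags
-- ===== SOURCE B (Python) =====
-- def get_hashtags_operations(x):
--     """Character-level re-implementation: a 3-state automaton scanning the raw
--     characters once (state 0 = no '#' seen in the current word, 1 = collecting the
--     tag after the first '#', 2 = past a second '#'), flushing at spaces/end; no
--     split/lower/replace list pipeline at all."""
--     res = []
--     state = 0
--     buf = []
--     for c in x:
--         if c == ' ':
--             if state != 0 and buf[:2] == ['o', 'p']:
--                 res.append('#' + ''.join(buf))
--             state = 0
--             buf = []
--         elif c == '\n':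
--             pass
--         elif c == '#':
--             if state < 2:
--                 state += 1
--         else:
--             if state == 1:
--                 buf.append(c.lower())
--     if state != 0 and buf[:2] == ['o', 'p']:
--         res.append('#' + ''.join(buf))
--     return res
-- ===== Notes on version B (the rewrite author's own statement) =====
-- stated objective: alternative
-- what changed: Replaced A's five list-comprehension passes over split-produced word lists (lower, newline-strip, '#'-membership filter, split('#')[1] extraction, '#op' prefix filter) with a single character-level 3-state automaton over the raw string that never builds the word list: it tracks before-first-'#' / collecting-tag / past-second-'#' per word and flushes a hashtag at each space and at the end.
import Mathlib
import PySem

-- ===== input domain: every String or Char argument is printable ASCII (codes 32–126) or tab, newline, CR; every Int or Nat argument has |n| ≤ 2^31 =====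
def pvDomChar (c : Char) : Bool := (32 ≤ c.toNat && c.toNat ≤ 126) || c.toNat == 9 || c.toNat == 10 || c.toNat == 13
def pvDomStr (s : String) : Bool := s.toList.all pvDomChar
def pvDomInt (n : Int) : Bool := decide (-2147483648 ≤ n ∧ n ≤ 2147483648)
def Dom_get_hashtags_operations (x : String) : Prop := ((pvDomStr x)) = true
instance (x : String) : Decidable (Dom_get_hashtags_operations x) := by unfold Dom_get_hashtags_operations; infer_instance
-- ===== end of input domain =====

-- B replaces A's multi-pass word-list pipeline with a single character-level 3-state automaton over the raw string (objective: alternative, same cost).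


-- ===== PORT A =====
-- A, step for step on code points (Python str = List Char here; String.ofList only converts the
-- representation of each produced hashtag back to String). '+' on str is cons of '#'.
def get_hashtags_operations (x : String) : List String :=
  let tokens := PySem.Chars.splitOn x.toList [' ']
  -- convert to lower case
  let tokens := tokens.map (fun w => PySem.Chars.lower w)
  -- remove break lines
  let tokens := tokens.map (fun w => PySem.Chars.replace w ['\n'] [])
  -- get hashtags
  let hashtags := tokens.filter (fun t => PySem.Chars.isIn ['#'] t)
  -- clean multiple hashtags in same line ('#' ∈ t guarantees the split has a second piece,
  -- so the pyGetD default is never used — exact)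
  let hashtags := hashtags.map (fun h => '#' :: PySem.List.pyGetD (PySem.Chars.splitOn h ['#']) 1 [])
  -- get operation hashtags
  let hashtags := hashtags.filter (fun h => PySem.Chars.slice h none (some 3) == ['#', 'o', 'p'])
  hashtags.map String.ofList

-- ===== PORT B =====
-- Source B's flush: emit the collected tag if a '#' was seen and the tag starts with "op".
def pvFlush (st : Nat) (buf : List Char) (res : List String) : List String :=
  if st ≠ 0 ∧ buf.take 2 = ['o', 'p'] then res ++ [String.ofList ('#' :: buf)] else res

-- Source B's loop: one step per character, state st ∈ {0,1,2}, buf = tag collected so far.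
def pvGoB : List Char → Nat → List Char → List String → List String
  | [], st, buf, res => pvFlush st buf res
  | c :: cs, st, buf, res =>
    if c = ' ' then pvGoB cs 0 [] (pvFlush st buf res)
    else if c = '\n' then pvGoB cs st buf res
    else if c = '#' then pvGoB cs (if st < 2 then st + 1 else st) buf res
    else pvGoB cs st (if st = 1 then buf ++ [PySem.Chars.lowerChar c] else buf) res

def get_hashtags_operations_alt (x : String) : List String := pvGoB x.toList 0 [] []

-- ===== PRECONDITION & SPEC =====
def Spec_get_hashtags_operations (x : String) (out : List String) : Prop := out = get_hashtags_operations_alt x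
instance (x : String) (out : List String) : Decidable (Spec_get_hashtags_operations x out) := by unfold Spec_get_hashtags_operations; infer_instance

-- ===== CLAIM (what is proved, stated in full; the proofs are below) =====
def Claim_equal_get_hashtags_operations : Prop := ∀ (x : String), Dom_get_hashtags_operations x → Spec_get_hashtags_operations x (get_hashtags_operations x)

-- ===== LEMMAS AND PROOFS =====

-- ---- generic character facts ----
theorem pv_ofNat_toNat (n : Nat) (h : n < 55296) : (Char.ofNat n).toNat = n := by
  have hv : Nat.isValidChar n := Or.inl h
  simp [Char.ofNat, hv, Char.toNat, Char.ofNatAux]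

-- lowering a character can only produce a non-letter character d if the character was d already
theorem pv_lowerChar_eq_iff (c d : Char)
    (hd : d.toNat < 65 ∨ (90 < d.toNat ∧ (d.toNat < 97 ∨ 122 < d.toNat))) :
    (PySem.Chars.lowerChar c = d) ↔ c = d := by
  unfold PySem.Chars.lowerChar
  split
  next hu =>
    simp only [PySem.Chars.isupper, Bool.and_eq_true, decide_eq_true_eq] at hu
    have h1 : 65 ≤ c.toNat := Nat.succ_le_of_lt hu.1
    have h2 : c.toNat ≤ 90 := Fin.mk_le_mk.mp hu.2
    have h3 : (Char.ofNat (c.toNat + 32)).toNat = c.toNat + 32 := pv_ofNat_toNat _ (by omega)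
    constructor
    · intro he; exfalso
      have := congrArg Char.toNat he; rw [h3] at this; omega
    · intro he; exfalso; subst he; omega
  next => exact Iff.rfl

-- ---- a structural characterisation of Python's str.split on a one-character separator ----
def pvSplit1 (c0 : Char) : List Char → List Char → List (List Char)
  | [], cur => [cur.reverse]
  | c :: rest, cur => if c = c0 then cur.reverse :: pvSplit1 c0 rest [] else pvSplit1 c0 rest (c :: cur)

theorem pv_go_spec (c0 : Char) (l : List Char) : ∀ (fuel : Nat) (cur : List Char) (acc : List (List Char)),
    l.length ≤ fuel →
    PySem.Chars.splitOn.go [c0] fuel l cur acc = acc.reverse ++ pvSplit1 c0 l cur := by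
  induction l with
  | nil =>
    intro fuel cur acc _
    cases fuel <;> rw [PySem.Chars.splitOn.go.eq_def] <;> simp [pvSplit1]
  | cons c rest ih =>
    intro fuel cur acc hf
    cases fuel with
    | zero => simp at hf
    | succ n =>
      rw [show PySem.Chars.splitOn.go [c0] (n+1) (c :: rest) cur acc =
            if [c0].isPrefixOf (c :: rest) then
              PySem.Chars.splitOn.go [c0] n (List.drop 1 (c :: rest)) [] (cur.reverse :: acc)
            else PySem.Chars.splitOn.go [c0] n rest (c :: cur) acc from rfl]
      by_cases hc : c = c0
      · subst hc
        rw [if_pos (by simp [List.isPrefixOf])]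
        rw [List.drop_one, List.tail_cons, ih n [] (cur.reverse :: acc) (Nat.le_of_succ_le_succ hf)]
        simp [pvSplit1]
      · rw [if_neg (by simp [List.isPrefixOf]; intro h; exact absurd h.symm hc)]
        rw [ih n (c :: cur) acc (Nat.le_of_succ_le_succ hf)]
        simp [pvSplit1, hc]

theorem pv_splitOn_eq (c0 : Char) (s : List Char) :
    PySem.Chars.splitOn s [c0] = pvSplit1 c0 s [] := by
  unfold PySem.Chars.splitOn
  rw [pv_go_spec c0 s (s.length + 1) [] [] (by omega)]
  simp

theorem pv_split_app (c0 : Char) (a : List Char) : ∀ (b cur : List Char), c0 ∉ a →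
    pvSplit1 c0 (a ++ c0 :: b) cur = (cur.reverse ++ a) :: pvSplit1 c0 b [] := by
  induction a with
  | nil => intro b cur _; simp [pvSplit1]
  | cons c a ih =>
    intro b cur ha
    have hc : c ≠ c0 := fun h => ha (h ▸ List.mem_cons_self)
    simp only [List.cons_append, pvSplit1, if_neg hc]
    rw [ih b (c :: cur) (fun h => ha (List.mem_cons_of_mem _ h))]
    simp

theorem pv_split_no (c0 : Char) (b : List Char) : ∀ (cur : List Char), c0 ∉ b →
    pvSplit1 c0 b cur = [cur.reverse ++ b] := by
  induction b with
  | nil => intro cur _; simp [pvSplit1]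
  | cons c b ih =>
    intro cur hb
    have hc : c ≠ c0 := fun h => hb (h ▸ List.mem_cons_self)
    simp only [pvSplit1, if_neg hc]
    rw [ih (c :: cur) (fun h => hb (List.mem_cons_of_mem _ h))]
    simp

-- ---- str.replace(c, '') is a filter ----
theorem pv_rgo_spec (c0 : Char) (l : List Char) : ∀ (fuel : Nat) (acc : List Char),
    l.length ≤ fuel →
    PySem.Chars.replace.go [c0] [] fuel l acc = acc.reverse ++ l.filter (· ≠ c0) := by
  induction l with
  | nil =>
    intro fuel acc _
    cases fuel <;> rw [PySem.Chars.replace.go.eq_def] <;> simp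
  | cons c rest ih =>
    intro fuel acc hf
    cases fuel with
    | zero => simp at hf
    | succ n =>
      rw [show PySem.Chars.replace.go [c0] [] (n+1) (c :: rest) acc =
            if [c0].isPrefixOf (c :: rest) then
              PySem.Chars.replace.go [c0] [] n (List.drop 1 (c :: rest)) ([].reverse ++ acc)
            else PySem.Chars.replace.go [c0] [] n rest (c :: acc) from rfl]
      by_cases hc : c = c0
      · subst hc
        rw [if_pos (by simp [List.isPrefixOf])]
        simp only [List.reverse_nil, List.nil_append, List.drop_one, List.tail_cons]
        rw [ih n acc (Nat.le_of_succ_le_succ hf)]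
        simp
      · rw [if_neg (by simp [List.isPrefixOf]; intro h; exact absurd h.symm hc)]
        rw [ih n (c :: acc) (Nat.le_of_succ_le_succ hf)]
        simp [hc]

theorem pv_replace_filter (c0 : Char) (s : List Char) :
    PySem.Chars.replace s [c0] [] = s.filter (· ≠ c0) := by
  unfold PySem.Chars.replace
  rw [if_neg (by simp)]
  exact pv_rgo_spec c0 s s.length [] (Nat.le_refl _)

-- ---- A's pipeline as one filterMap over the words ----
def pvProc (w : List Char) : Option String :=
  let w' := PySem.Chars.replace (PySem.Chars.lower w) ['\n'] []
  if PySem.Chars.isIn ['#'] w' = true then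
    let h := '#' :: PySem.List.pyGetD (PySem.Chars.splitOn w' ['#']) 1 []
    if (PySem.Chars.slice h none (some 3) == ['#', 'o', 'p']) = true then some (String.ofList h)
    else none
  else none

theorem pv_pipe (ts : List (List Char)) :
    (((((ts.map (fun w => PySem.Chars.lower w)).map
        (fun w => PySem.Chars.replace w ['\n'] [])).filter
        (fun t => PySem.Chars.isIn ['#'] t)).map
        (fun h => '#' :: PySem.List.pyGetD (PySem.Chars.splitOn h ['#']) 1 [])).filter
        (fun h => PySem.Chars.slice h none (some 3) == ['#', 'o', 'p'])).map String.ofList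
      = ts.filterMap pvProc := by
  induction ts with
  | nil => simp
  | cons t ts ih =>
    simp only [List.map_cons, List.filter_cons]
    by_cases h1 : PySem.Chars.isIn ['#'] (PySem.Chars.replace (PySem.Chars.lower t) ['\n'] []) = true
    · rw [if_pos h1]
      simp only [List.map_cons, List.filter_cons]
      by_cases h2 : (PySem.Chars.slice ('#' :: PySem.List.pyGetD
          (PySem.Chars.splitOn (PySem.Chars.replace (PySem.Chars.lower t) ['\n'] []) ['#']) 1 [])
          none (some 3) == ['#', 'o', 'p']) = true
      · rw [if_pos h2, List.map_cons, List.filterMap_cons,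
          show pvProc t = some (String.ofList ('#' :: PySem.List.pyGetD
            (PySem.Chars.splitOn (PySem.Chars.replace (PySem.Chars.lower t) ['\n'] []) ['#']) 1 []))
          from by simp only [pvProc]; rw [if_pos h1, if_pos h2]]
        rw [ih]
      · rw [if_neg h2, List.filterMap_cons,
          show pvProc t = none from by simp only [pvProc]; rw [if_pos h1, if_neg h2]]
        simpa using ih
    · rw [if_neg h1, List.filterMap_cons,
        show pvProc t = none from by simp only [pvProc]; rw [if_neg h1]]
      simpa using ih

theorem pv_A_filterMap (x : String) :
    get_hashtags_operations x = (PySem.Chars.splitOn x.toList [' ']).filterMap pvProc := by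
  unfold get_hashtags_operations
  exact pv_pipe _

-- ---- the automaton on cleaned characters ----
-- pvStep: one automaton step on a raw character (what pvGoB does for a non-space character).
def pvStep (s : Nat × List Char) (c : Char) : Nat × List Char :=
  if c = '\n' then s
  else if c = '#' then (if s.1 < 2 then s.1 + 1 else s.1, s.2)
  else (s.1, if s.1 = 1 then s.2 ++ [PySem.Chars.lowerChar c] else s.2)

-- pvStepC: the same step on an already lowered, newline-free character.
def pvStepC (s : Nat × List Char) (c : Char) : Nat × List Char :=
  if c = '#' then (if s.1 < 2 then s.1 + 1 else s.1, s.2)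
  else (s.1, if s.1 = 1 then s.2 ++ [c] else s.2)

theorem pv_run_clean (w : List Char) : ∀ (s : Nat × List Char),
    w.foldl pvStep s = ((w.map PySem.Chars.lowerChar).filter (· ≠ '\n')).foldl pvStepC s := by
  induction w with
  | nil => intro s; rfl
  | cons c w ih =>
    intro s
    by_cases hn : c = '\n'
    · subst hn
      simp only [List.foldl_cons, List.map_cons, show PySem.Chars.lowerChar '\n' = '\n' from rfl,
        List.filter_cons, decide_eq_true_eq]
      rw [if_neg (by simp)]
      simp [pvStep, ih]
    · have hln : PySem.Chars.lowerChar c ≠ '\n' := by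
        rw [Ne, pv_lowerChar_eq_iff c '\n' (by left; decide)]; exact hn
      by_cases hh : c = '#'
      · subst hh
        simp only [List.foldl_cons, List.map_cons, show PySem.Chars.lowerChar '#' = '#' from rfl,
          List.filter_cons]
        rw [if_pos (by simp)]
        simp only [List.foldl_cons]
        rw [show pvStep s '#' = pvStepC s '#' by simp [pvStep, pvStepC]]
        exact ih _
      · have hlh : PySem.Chars.lowerChar c ≠ '#' := by
          rw [Ne, pv_lowerChar_eq_iff c '#' (by left; decide)]; exact hh
        simp only [List.foldl_cons, List.map_cons, List.filter_cons]
        rw [if_pos (by simp [hln])]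
        simp only [List.foldl_cons]
        rw [show pvStep s c = pvStepC s (PySem.Chars.lowerChar c) by
          simp [pvStep, pvStepC, hn, hh, hlh]]
        exact ih _

-- fold facts for each automaton state
theorem pv_fold0 (a : List Char) : ∀ (buf : List Char), '#' ∉ a →
    a.foldl pvStepC (0, buf) = (0, buf) := by
  induction a with
  | nil => intro buf _; rfl
  | cons c a ih =>
    intro buf ha
    have hc : c ≠ '#' := fun h => ha (h ▸ List.mem_cons_self)
    simp only [List.foldl_cons, pvStepC, if_neg hc]
    exact ih buf (fun h => ha (List.mem_cons_of_mem _ h))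

theorem pv_fold1 (p : List Char) : ∀ (buf : List Char), '#' ∉ p →
    p.foldl pvStepC (1, buf) = (1, buf ++ p) := by
  induction p with
  | nil => intro buf _; simp
  | cons c p ih =>
    intro buf hp
    have hc : c ≠ '#' := fun h => hp (h ▸ List.mem_cons_self)
    simp only [List.foldl_cons, pvStepC, if_neg hc]
    rw [if_true]
    rw [ih (buf ++ [c]) (fun h => hp (List.mem_cons_of_mem _ h))]
    simp

theorem pv_fold2 (q : List Char) : ∀ (buf : List Char),
    q.foldl pvStepC (2, buf) = (2, buf) := by
  induction q with
  | nil => intro buf; rfl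
  | cons c q ih =>
    intro buf
    by_cases hc : c = '#'
    · subst hc; simp only [List.foldl_cons, pvStepC]
      rw [show (if (2:Nat) < 2 then 2 + 1 else 2) = 2 from by simp]
      exact ih buf
    · simp only [List.foldl_cons, pvStepC, if_neg hc]
      rw [show (if (2:Nat) = 1 then buf ++ [c] else buf) = buf from by simp]
      exact ih buf

-- first-occurrence decomposition
theorem pv_first_split (c0 : Char) (u : List Char) (h : c0 ∈ u) :
    ∃ a b, u = a ++ c0 :: b ∧ c0 ∉ a := by
  induction u with
  | nil => cases h
  | cons c u ih =>
    by_cases hc : c = c0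
    · exact ⟨[], u, by simp [hc], by simp⟩
    · have : c0 ∈ u := by
        cases List.mem_cons.mp h with
        | inl h' => exact absurd h'.symm hc
        | inr h' => exact h'
      obtain ⟨a, b, rfl, ha⟩ := ih this
      exact ⟨c :: a, b, rfl, by simp [ha]; exact fun h' => hc h'.symm⟩

-- the '#op' test of A equals B's buffer test
theorem pv_cond_eq (seg : List Char) :
    ((PySem.Chars.slice ('#' :: seg) none (some 3) == ['#', 'o', 'p']) = true)
      ↔ seg.take 2 = ['o', 'p'] := by
  rw [PySem.Chars.slice_eq_listSlice,
    show PySem.List.slice ('#' :: seg) none (some 3) = ('#' :: seg).take 3 from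
      PySem.List.slice_to_natCast ('#' :: seg) 3]
  simp

-- membership form of A's '#' in w test
theorem pv_isIn_mem (u : List Char) : (PySem.Chars.isIn ['#'] u = true) ↔ '#' ∈ u := by
  rw [PySem.Chars.isIn_iff_infix]; exact List.singleton_infix_iff '#' u

-- per-cleaned-word agreement: flushing the automaton's final state = A's per-word pipeline
theorem pv_Q (u : List Char) :
    pvFlush (u.foldl pvStepC (0, [])).1 (u.foldl pvStepC (0, [])).2 []
      = (if PySem.Chars.isIn ['#'] u = true then
           if (PySem.Chars.slice ('#' :: PySem.List.pyGetD (PySem.Chars.splitOn u ['#']) 1 [])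
               none (some 3) == ['#', 'o', 'p']) = true then
             some (String.ofList ('#' :: PySem.List.pyGetD (PySem.Chars.splitOn u ['#']) 1 []))
           else none
         else none).toList := by
  by_cases hmem : '#' ∈ u
  · obtain ⟨a, b, rfl, ha⟩ := pv_first_split '#' (u := u) hmem
    have hsplit : PySem.Chars.splitOn (a ++ '#' :: b) ['#'] = a :: pvSplit1 '#' b [] := by
      rw [pv_splitOn_eq, pv_split_app '#' a b [] ha]; simp
    have hfold : (a ++ '#' :: b).foldl pvStepC (0, ([] : List Char))
        = b.foldl pvStepC (1, []) := by
      rw [List.foldl_append, pv_fold0 a [] ha]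
      simp [pvStepC]
    rw [if_pos ((pv_isIn_mem _).mpr hmem), hfold, hsplit]
    by_cases hb : '#' ∈ b
    · obtain ⟨p, q, rfl, hp⟩ := pv_first_split '#' (u := b) hb
      have h2 : (p ++ '#' :: q).foldl pvStepC (1, ([] : List Char)) = (2, p) := by
        rw [List.foldl_append, pv_fold1 p [] hp]
        simp only [List.foldl_cons, pvStepC]
        rw [show (if (1:Nat) < 2 then 1 + 1 else 1) = 2 from by simp]
        exact pv_fold2 q p
      rw [h2, pv_split_app '#' p q [] hp]
      have hseg : PySem.List.pyGetD (a :: ([].reverse ++ p) :: pvSplit1 '#' q []) 1 ([] : List Char) = p := by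
        simp [PySem.List.pyGetD]
      rw [hseg]
      by_cases hc : p.take 2 = ['o', 'p']
      · rw [if_pos ((pv_cond_eq p).mpr hc)]
        simp [pvFlush, hc]
      · rw [if_neg (by rw [pv_cond_eq]; exact hc)]
        simp [pvFlush, hc]
    · rw [pv_fold1 b [] hb, pv_split_no '#' b [] hb]
      have hseg : PySem.List.pyGetD [a, [].reverse ++ b] 1 ([] : List Char) = b := by
        simp [PySem.List.pyGetD]
      rw [hseg]
      by_cases hc : b.take 2 = ['o', 'p']
      · rw [if_pos ((pv_cond_eq b).mpr hc)]
        simp [pvFlush, hc]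
      · rw [if_neg (by rw [pv_cond_eq]; exact hc)]
        simp [pvFlush, hc]
  · rw [pv_fold0 u [] hmem]
    rw [if_neg (by rw [pv_isIn_mem]; exact hmem)]
    simp [pvFlush]

-- per raw word: B's flush of the automaton run = A's pipeline value
theorem pv_perword (w : List Char) :
    pvFlush (w.foldl pvStep (0, [])).1 (w.foldl pvStep (0, [])).2 [] = (pvProc w).toList := by
  rw [pv_run_clean w (0, [])]
  have hw : PySem.Chars.replace (PySem.Chars.lower w) ['\n'] []
      = (w.map PySem.Chars.lowerChar).filter (· ≠ '\n') := by
    rw [show PySem.Chars.lower w = w.map PySem.Chars.lowerChar from rfl, pv_replace_filter]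
  rw [show pvProc w = (if PySem.Chars.isIn ['#'] ((w.map PySem.Chars.lowerChar).filter (· ≠ '\n')) = true then
      if (PySem.Chars.slice ('#' :: PySem.List.pyGetD
          (PySem.Chars.splitOn ((w.map PySem.Chars.lowerChar).filter (· ≠ '\n')) ['#']) 1 [])
          none (some 3) == ['#', 'o', 'p']) = true then
        some (String.ofList ('#' :: PySem.List.pyGetD
          (PySem.Chars.splitOn ((w.map PySem.Chars.lowerChar).filter (· ≠ '\n')) ['#']) 1 []))
      else none
    else none) from by simp only [pvProc, hw]]
  exact pv_Q _

-- pvGoB threads its result list through; split it off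
theorem pv_flush_append (st : Nat) (buf : List Char) (res : List String) :
    pvFlush st buf res = res ++ pvFlush st buf [] := by
  unfold pvFlush; split_ifs <;> simp

-- the automaton's output starting mid-word (state = run of the reversed current word)
def pvWordsOut : List Char → Nat → List Char → List String
  | [], st, buf => pvFlush st buf []
  | c :: cs, st, buf =>
    if c = ' ' then pvFlush st buf [] ++ pvWordsOut cs 0 []
    else if c = '\n' then pvWordsOut cs st buf
    else if c = '#' then pvWordsOut cs (if st < 2 then st + 1 else st) buf
    else pvWordsOut cs st (if st = 1 then buf ++ [PySem.Chars.lowerChar c] else buf)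

theorem pv_goB_words (cs : List Char) : ∀ (st : Nat) (buf : List Char) (res : List String),
    pvGoB cs st buf res = res ++ pvWordsOut cs st buf := by
  induction cs with
  | nil => intro st buf res; exact pv_flush_append st buf res
  | cons c cs ih =>
    intro st buf res
    simp only [pvGoB, pvWordsOut]
    split_ifs
    · rw [ih, pv_flush_append st buf res, List.append_assoc]
    all_goals rw [ih]

-- the main invariant: from the state reached by the current partial word cur (reversed),
-- the automaton's remaining output is A's pipeline over the remaining words
theorem pv_main (cs : List Char) : ∀ (cur : List Char),
    pvWordsOut cs ((cur.reverse).foldl pvStep (0, [])).1 ((cur.reverse).foldl pvStep (0, [])).2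
      = (pvSplit1 ' ' cs cur).filterMap pvProc := by
  induction cs with
  | nil =>
    intro cur
    simp only [pvWordsOut, pvSplit1, List.filterMap_cons, List.filterMap_nil]
    rw [pv_perword]
    cases pvProc cur.reverse <;> simp
  | cons c cs ih =>
    intro cur
    by_cases hsp : c = ' '
    · subst hsp
      simp only [pvWordsOut, pvSplit1]
      rw [pv_perword]
      have h0 := ih []
      simp only [List.reverse_nil, List.foldl_nil] at h0
      rw [h0]
      cases hp : pvProc cur.reverse <;> simp [hp]
    · have hrun : ((c :: cur).reverse).foldl pvStep (0, ([] : List Char))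
          = pvStep ((cur.reverse).foldl pvStep (0, [])) c := by
        rw [List.reverse_cons, List.foldl_append]; rfl
      have hnext := ih (c :: cur)
      rw [hrun] at hnext
      simp only [pvWordsOut, pvSplit1, if_neg hsp]
      rw [← hnext]
      by_cases hn : c = '\n'
      · subst hn; simp [pvStep]
      · by_cases hh : c = '#'
        · subst hh; simp [pvStep]
        · simp [pvStep, hn, hh]

-- ===== VERDICT (by name: the statement is the Claim_ definition above) =====
theorem get_hashtags_operations_spec : Claim_equal_get_hashtags_operations := by
  intro x _
  unfold Spec_get_hashtags_operations get_hashtags_operations_alt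
  rw [pv_A_filterMap, pv_goB_words, pv_splitOn_eq]
  have h := pv_main x.toList []
  simp only [List.reverse_nil, List.foldl_nil] at h
  simpa using h.symm
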